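-- pv_equiv track=rewrite | github.com/JRedxs/Socket | serveur.py | jouer_chorale
-- ===== SOURCE A (Python) =====
-- def jouer_chorale(ordre_chanteurs, choral):
--     chanteurs = ["A", "B", "C"]
--     chanteur_index = 0
--     triangle_count = 0
--     output = ""
--     for i in range(len(ordre_chanteurs)):
--         chanteur = chanteurs[chanteur_index]
--         if chanteur == choral:
--             output += chanteur + choral + " "
--         else:
--             output += chanteur + " "
--         chanteur_index += 1
--         if chanteur_index == 3:
--             chanteur_index = 0
--             triangle_count += 1
--             if triangle_count == 3:
--                 output += "/ "
--                 triangle_count = 0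
--     return output
-- ===== SOURCE B (Python) =====
-- def jouer_chorale(ordre_chanteurs, choral):
--     n = len(ordre_chanteurs)
--     tokens = []
--     for c in "ABC":
--         tokens.append((c + c if c == choral else c) + " ")
--     block = "".join(tokens) * 3 + "/ "
--     rem = "".join(tokens[i % 3] for i in range(n % 9))
--     return block * (n // 9) + rem
-- ===== Notes on version B (the rewrite author's own statement) =====
-- stated objective: faster
-- what changed: Replaced A's per-singer loop with three counters by building the fixed 9-singer block string once and repeating it n//9 times with string multiplication, plus a closed-form remainder for the last n%9 singers.
import Mathlib
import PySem

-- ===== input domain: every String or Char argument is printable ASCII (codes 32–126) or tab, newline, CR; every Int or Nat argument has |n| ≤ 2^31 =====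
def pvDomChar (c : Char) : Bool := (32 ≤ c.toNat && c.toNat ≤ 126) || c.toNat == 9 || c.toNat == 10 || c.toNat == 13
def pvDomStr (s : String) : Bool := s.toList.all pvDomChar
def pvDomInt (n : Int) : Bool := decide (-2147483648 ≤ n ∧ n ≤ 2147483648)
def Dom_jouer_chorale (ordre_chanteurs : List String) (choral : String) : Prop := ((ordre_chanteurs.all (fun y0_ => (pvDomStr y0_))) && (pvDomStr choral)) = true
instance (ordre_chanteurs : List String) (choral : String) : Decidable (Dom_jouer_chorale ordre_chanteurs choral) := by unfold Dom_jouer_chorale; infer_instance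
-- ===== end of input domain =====

-- B replaces A's per-singer counter loop by building the fixed 9-singer block once and
-- repeating it n/9 times plus a remainder (measured faster in Python; different decomposition).

-- ===== PORT A =====
-- A's loop body; state is (chanteur_index, triangle_count, output).
-- chanteur_index is always 0, 1 or 2, so List.getD is exact for chanteurs[chanteur_index].
def pvStepA (choral : String) (st : Nat × Nat × String) (_i : Nat) : Nat × Nat × String :=
  let chanteur := ["A", "B", "C"].getD st.1 ""
  let out := if chanteur = choral then st.2.2 ++ chanteur ++ choral ++ " "
             else st.2.2 ++ chanteur ++ " "
  let ci := st.1 + 1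
  if ci = 3 then
    if st.2.1 + 1 = 3 then (0, 0, out ++ "/ ") else (0, st.2.1 + 1, out)
  else (ci, st.2.1, out)

def jouer_chorale (ordre_chanteurs : List String) (choral : String) : String :=
  ((List.range ordre_chanteurs.length).foldl (pvStepA choral) (0, 0, "")).2.2

-- ===== PORT B =====
def pvTok (choral : String) (c : String) : String :=
  (if c = choral then c ++ c else c) ++ " "

-- Python's  s * k  for strings
def pvStrMul (s : String) (k : Nat) : String := (List.replicate k s).foldl (· ++ ·) ""

def jouer_chorale_alt (ordre_chanteurs : List String) (choral : String) : String :=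
  let n := ordre_chanteurs.length
  let tokens := ["A", "B", "C"].map (pvTok choral)
  let block := pvStrMul (tokens.foldl (· ++ ·) "") 3 ++ "/ "
  let rem := ((List.range (n % 9)).map (fun i => tokens.getD (i % 3) "")).foldl (· ++ ·) ""
  pvStrMul block (n / 9) ++ rem

-- ===== PRECONDITION & SPEC =====
def Spec_jouer_chorale (ordre_chanteurs : List String) (choral : String) (out : String) : Prop := out = jouer_chorale_alt ordre_chanteurs choral
instance (ordre_chanteurs : List String) (choral : String) (out : String) : Decidable (Spec_jouer_chorale ordre_chanteurs choral out) := by unfold Spec_jouer_chorale; infer_instance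

-- ===== CLAIM (what is proved, stated in full; the proofs are below) =====
def Claim_equal_jouer_chorale : Prop := ∀ (ordre_chanteurs : List String) (choral : String), Dom_jouer_chorale ordre_chanteurs choral → Spec_jouer_chorale ordre_chanteurs choral (jouer_chorale ordre_chanteurs choral)

-- ===== LEMMAS AND PROOFS =====

-- proof-side abbreviations for the pieces of B
def pvTokAt (choral : String) (k : Nat) : String :=
  (["A", "B", "C"].map (pvTok choral)).getD k ""

def pvRem (choral : String) (r : Nat) : String :=
  ((List.range r).map (fun i => (["A", "B", "C"].map (pvTok choral)).getD (i % 3) "")).foldl (· ++ ·) ""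

def pvBlock (choral : String) : String :=
  pvStrMul ((["A", "B", "C"].map (pvTok choral)).foldl (· ++ ·) "") 3 ++ "/ "

def pvOut (choral : String) (n : Nat) : String :=
  pvStrMul (pvBlock choral) (n / 9) ++ pvRem choral (n % 9)

-- A's output after n iterations, written recursively
def pvOutRec (choral : String) : Nat → String
  | 0 => ""
  | n + 1 => pvOutRec choral n ++ pvTokAt choral (n % 3) ++ (if n % 9 = 8 then "/ " else "")

lemma pvStrMul_succ (s : String) (k : Nat) : pvStrMul s (k + 1) = pvStrMul s k ++ s := by
  simp [pvStrMul, List.replicate_succ', List.foldl_append]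

lemma pvRem_succ (choral : String) (r : Nat) :
    pvRem choral (r + 1) = pvRem choral r ++ pvTokAt choral (r % 3) := by
  simp [pvRem, pvTokAt, List.range_succ]

lemma pvBlock_eq (choral : String) :
    pvRem choral 8 ++ pvTokAt choral 2 ++ "/ " = pvBlock choral := by
  simp [pvRem, pvTokAt, pvBlock, pvStrMul, List.range_succ, String.append_assoc,
    String.empty_append]

lemma invA (choral : String) (n : Nat) :
    (List.range n).foldl (pvStepA choral) (0, 0, "") = (n % 3, n / 3 % 3, pvOutRec choral n) := by
  induction n with
  | zero => simp [pvOutRec]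
  | succ n ih =>
    rw [List.range_succ, List.foldl_append, ih]
    simp only [List.foldl_cons, List.foldl_nil, pvStepA, pvOutRec]
    have h3 : n % 3 = 0 ∨ n % 3 = 1 ∨ n % 3 = 2 := by omega
    rcases h3 with h | h | h <;> rw [h] <;>
      simp only [List.getD, List.getElem?_cons_zero, List.getElem?_cons_succ, Option.getD_some,
        ]
    · rw [if_neg (by omega), if_neg (show ¬ n % 9 = 8 by omega), String.append_empty,
        Prod.mk.injEq, Prod.mk.injEq]
      refine ⟨by omega, by omega, ?_⟩
      split_ifs with hc
      · subst hc; simp [pvTokAt, pvTok, String.append_assoc]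
      · simp [pvTokAt, pvTok, hc, String.append_assoc]
    · rw [if_neg (by omega), if_neg (show ¬ n % 9 = 8 by omega), String.append_empty,
        Prod.mk.injEq, Prod.mk.injEq]
      refine ⟨by omega, by omega, ?_⟩
      split_ifs with hc
      · subst hc; simp [pvTokAt, pvTok, String.append_assoc]
      · simp [pvTokAt, pvTok, hc, String.append_assoc]
    · rw [if_pos trivial]
      have h33 : n / 3 % 3 = 0 ∨ n / 3 % 3 = 1 ∨ n / 3 % 3 = 2 := by omega
      rcases h33 with h' | h' | h' <;> rw [h']
      · rw [if_neg (by omega), if_neg (show ¬ n % 9 = 8 by omega), String.append_empty,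
          Prod.mk.injEq, Prod.mk.injEq]
        refine ⟨by omega, by omega, ?_⟩
        split_ifs with hc
        · subst hc; simp [pvTokAt, pvTok, String.append_assoc]
        · simp [pvTokAt, pvTok, hc, String.append_assoc]
      · rw [if_neg (by omega), if_neg (show ¬ n % 9 = 8 by omega), String.append_empty,
          Prod.mk.injEq, Prod.mk.injEq]
        refine ⟨by omega, by omega, ?_⟩
        split_ifs with hc
        · subst hc; simp [pvTokAt, pvTok, String.append_assoc]
        · simp [pvTokAt, pvTok, hc, String.append_assoc]
      · rw [if_pos rfl, if_pos (show n % 9 = 8 by omega), Prod.mk.injEq, Prod.mk.injEq]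
        refine ⟨by omega, by omega, ?_⟩
        split_ifs with hc
        · subst hc; simp [pvTokAt, pvTok, String.append_assoc]
        · simp [pvTokAt, pvTok, hc, String.append_assoc]

lemma outRec_eq_out (choral : String) (n : Nat) : pvOutRec choral n = pvOut choral n := by
  induction n with
  | zero => simp [pvOutRec, pvOut, pvRem, pvStrMul]
  | succ n ih =>
    by_cases h8 : n % 9 = 8
    · rw [pvOutRec, ih, if_pos h8, pvOut, pvOut,
        show (n + 1) / 9 = n / 9 + 1 by omega, show (n + 1) % 9 = 0 by omega,
        pvStrMul_succ, h8, show n % 3 = 2 by omega]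
      have : pvRem choral 0 = "" := rfl
      rw [this, String.append_empty, ← pvBlock_eq choral]
      simp [String.append_assoc]
    · rw [pvOutRec, ih, if_neg h8, String.append_empty, pvOut, pvOut,
        show (n + 1) / 9 = n / 9 by omega, show (n + 1) % 9 = n % 9 + 1 by omega,
        pvRem_succ, show n % 9 % 3 = n % 3 by omega, String.append_assoc]

lemma alt_eq (ordre_chanteurs : List String) (choral : String) :
    jouer_chorale_alt ordre_chanteurs choral = pvOut choral ordre_chanteurs.length := rfl

-- ===== VERDICT (by name: the statement is the Claim_ definition above) =====
theorem jouer_chorale_spec : Claim_equal_jouer_chorale := by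
  intro ordre_chanteurs choral _
  show jouer_chorale ordre_chanteurs choral = jouer_chorale_alt ordre_chanteurs choral
  rw [jouer_chorale, invA, alt_eq, outRec_eq_out]
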